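-- pv_equiv track=rewrite | github.com/benquick123/code-profiling | code/batch-2/vse-naloge-brez-testov/DN12-M-018.py | sosedi
-- ===== SOURCE A (Python) =====
-- def sosedi(doslej, zemljevid):
--     m = set()
--     for x in doslej:
--         stevila = zemljevid[x]
--         for s in stevila:
--             if s not in doslej:
--                 m.add(s)
--     return m
-- ===== SOURCE B (Python) =====
-- def sosedi(doslej, zemljevid):
--     # Divide and conquer on the visited nodes: the answer for a list of nodes
--     # is the union of the answers for its two halves; a singleton contributes
--     # its unvisited neighbors as a small set.
--     def rec(ds):
--         if not ds:
--             return set()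
--         if len(ds) == 1:
--             return {s for s in zemljevid[ds[0]] if s not in doslej}
--         mid = len(ds) // 2
--         return rec(ds[:mid]) | rec(ds[mid:])
--     return rec(list(doslej))
-- ===== Notes on version B (the rewrite author's own statement) =====
-- stated objective: alternative
-- what changed: B replaces A's iterative nested loop with a mutable accumulator set by divide-and-conquer recursion on the visited list, combining half-results with set union; singletons contribute their unvisited neighbors.
import Mathlib
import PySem

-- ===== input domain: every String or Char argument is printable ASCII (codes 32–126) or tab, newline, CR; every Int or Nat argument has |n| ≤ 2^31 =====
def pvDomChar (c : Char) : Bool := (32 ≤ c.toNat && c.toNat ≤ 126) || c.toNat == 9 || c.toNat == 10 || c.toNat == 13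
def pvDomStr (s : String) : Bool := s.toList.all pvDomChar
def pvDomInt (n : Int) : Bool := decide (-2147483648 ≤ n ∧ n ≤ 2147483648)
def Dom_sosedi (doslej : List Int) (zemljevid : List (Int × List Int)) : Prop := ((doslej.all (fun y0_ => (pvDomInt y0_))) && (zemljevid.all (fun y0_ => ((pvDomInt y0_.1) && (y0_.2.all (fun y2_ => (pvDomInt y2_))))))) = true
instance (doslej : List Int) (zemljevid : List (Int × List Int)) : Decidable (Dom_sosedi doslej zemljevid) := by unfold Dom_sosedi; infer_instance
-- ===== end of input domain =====

-- B replaces A's iterative nested loop + accumulator by divide-and-conquer recursion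
-- on the visited list, combining half-results with set union (alternative).


-- ===== PORT A =====
-- m = set(); for x in doslej: for s in zemljevid[x]: if s not in doslej: m.add(s)
def sosedi (doslej : List Int) (zemljevid : List (Int × List Int)) : List Int :=
  doslej.foldl
    (fun m x =>
      let stevila := ((PySem.Dict.mk zemljevid).get? x).getD []
      stevila.foldl
        (fun m s => if PySem.Set.contains doslej s then m else PySem.Set.add m s) m)
    PySem.Set.empty

-- ===== PORT B =====
-- rec(ds): if not ds: return set()
--          if len(ds) == 1: return {s for s in zemljevid[ds[0]] if s not in doslej}
--          mid = len(ds) // 2; return rec(ds[:mid]) | rec(ds[mid:])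
def sosediAltRec (doslej : List Int) (zemljevid : List (Int × List Int)) :
    List Int → List Int
  | [] => PySem.Set.empty
  | [x] =>
      PySem.Set.ofList
        ((((PySem.Dict.mk zemljevid).get? x).getD []).filter
          (fun s => !PySem.Set.contains doslej s))
  | x :: y :: rest =>
      let ds := x :: y :: rest
      let mid := ds.length / 2
      PySem.Set.union (sosediAltRec doslej zemljevid (ds.take mid))
        (sosediAltRec doslej zemljevid (ds.drop mid))
  termination_by ds => ds.length
  decreasing_by
  · simp only [List.length_take, List.length_cons]; omega
  · simp only [List.length_drop, List.length_cons]; omega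

def sosedi_alt (doslej : List Int) (zemljevid : List (Int × List Int)) : List Int :=
  sosediAltRec doslej zemljevid doslej

-- ===== PRECONDITION & SPEC =====
-- Pre_ excludes exactly the inputs on which Python A raises KeyError: some x in doslej
-- is not a key of zemljevid.
def Pre_sosedi (doslej : List Int) (zemljevid : List (Int × List Int)) : Prop :=
  ∀ x ∈ doslej, ((PySem.Dict.mk zemljevid).get? x).isSome

instance (doslej : List Int) (zemljevid : List (Int × List Int)) : Decidable (Pre_sosedi doslej zemljevid) := by unfold Pre_sosedi; infer_instance

def pvWitness_sosedi : List Int × (List (Int × List Int)) := ([1, 2], [(1, [2, 3, 4]), (2, [1]), (3, [])])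

def Spec_sosedi (doslej : List Int) (zemljevid : List (Int × List Int)) (out : List Int) : Prop := out = sosedi_alt doslej zemljevid
instance (doslej : List Int) (zemljevid : List (Int × List Int)) (out : List Int) : Decidable (Spec_sosedi doslej zemljevid out) := by unfold Spec_sosedi; infer_instance

-- ===== CLAIM =====
def Claim_equal_sosedi : Prop := ∀ (doslej : List Int) (zemljevid : List (Int × List Int)), Dom_sosedi doslej zemljevid → Pre_sosedi doslej zemljevid → Spec_sosedi doslej zemljevid (sosedi doslej zemljevid)

-- ===== LEMMAS AND PROOFS =====

-- A's guarded inner fold is the unguarded fold of the FILTERED neighbor list.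
theorem guarded_fold_eq_filter (P : Int → Bool) :
    ∀ (ys acc : List Int),
      ys.foldl (fun m s => if P s then m else PySem.Set.add m s) acc
      = (ys.filter (fun s => !P s)).foldl PySem.Set.add acc := by
  intro ys
  induction ys with
  | nil => intro acc; rfl
  | cons y ys ih =>
    intro acc
    by_cases hP : P y = true
    · simp [List.foldl_cons, hP, ih]
    · simp [List.foldl_cons, hP, ih]

-- update with a deduplicated list equals update with the raw list (add skips dups).
theorem update_ofList (s b : List Int) :
    PySem.Set.update s (PySem.Set.ofList b) = PySem.Set.update s b := by
  rw [PySem.Set.update_eq_append_filter, PySem.Set.update_eq_append_filter,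
    PySem.Set.ofList_ofList]

-- union of the ofLists of two lists is the ofList of their concatenation.
theorem union_ofList (a b : List Int) :
    PySem.Set.union (PySem.Set.ofList a) (PySem.Set.ofList b)
    = PySem.Set.ofList (a ++ b) := by
  rw [PySem.Set.ofList_append]
  exact update_ofList _ _

-- B's divide-and-conquer recursion builds the ofList of the concatenation of the
-- filtered neighbor lists.
theorem rec_eq_fold (doslej : List Int) (zemljevid : List (Int × List Int)) :
    ∀ (ds : List Int),
      sosediAltRec doslej zemljevid ds
      = (ds.flatMap (fun x =>
          (((PySem.Dict.mk zemljevid).get? x).getD []).filter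
            (fun s => !PySem.Set.contains doslej s))).foldl PySem.Set.add
          PySem.Set.empty := by
  intro ds
  induction ds using sosediAltRec.induct with
  | case1 => rw [sosediAltRec]; rfl
  | case2 x => rw [sosediAltRec]; simp [List.flatMap_cons, PySem.Set.ofList_eq_foldl]
  | case3 x y rest ds mid ih1 ih2 =>
    rw [sosediAltRec, ih1, ih2]
    rw [show ∀ l : List Int,
        l.foldl PySem.Set.add PySem.Set.empty = PySem.Set.ofList l from fun _ => rfl,
      show ∀ l : List Int,
        l.foldl PySem.Set.add PySem.Set.empty = PySem.Set.ofList l from fun _ => rfl,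
      union_ofList, ← List.flatMap_append, List.take_append_drop]
    rfl

-- A's nested fold is the same single add-fold over the same concatenation.
theorem a_eq_fold (doslej : List Int) (zemljevid : List (Int × List Int)) :
    ∀ (ds acc : List Int),
      ds.foldl
        (fun m x =>
          (((PySem.Dict.mk zemljevid).get? x).getD []).foldl
            (fun m s => if PySem.Set.contains doslej s then m
                        else PySem.Set.add m s) m) acc
      = (ds.flatMap (fun x =>
          (((PySem.Dict.mk zemljevid).get? x).getD []).filter
            (fun s => !PySem.Set.contains doslej s))).foldl PySem.Set.add acc := by
  intro ds
  induction ds with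
  | nil => intro acc; rfl
  | cons x rest ih =>
    intro acc
    rw [List.foldl_cons, List.flatMap_cons, List.foldl_append, ih,
      guarded_fold_eq_filter]

-- ===== VERDICT =====
theorem sosedi_spec : Claim_equal_sosedi := by
  intro doslej zemljevid _ _
  show sosedi doslej zemljevid = sosedi_alt doslej zemljevid
  unfold sosedi sosedi_alt
  rw [rec_eq_fold]
  exact a_eq_fold doslej zemljevid doslej PySem.Set.empty
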